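-- pv_equiv track=rewrite | github.com/Yotampd/Neural-Minimum-Weight-Perfect-Matching-For-Quantum-Error-Codes | GT_C.py | get_flipped_stabilizers_from_cluster_X
-- ===== SOURCE A (Python) =====
-- from collections import defaultdict
--
-- def qubit_idx_to_coord(q, L):
--     stripe = q // L  # qubit's row
--     offset = q % L  # qubit's col
--     is_horiz = (stripe % 2 == 0)  # qubits on horizontal lines has even stripe
--     row = stripe // 2
--     col = offset
--     return row, col, 'h' if is_horiz else 'v'
--
-- def qubit_to_stab_vertex(q, L):
--     r, c, ori = qubit_idx_to_coord(q, L)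
--     if ori == 'h':
--         return [(r % L, c % L),
--                 (r % L, (c + 1) % L)]  # if qubit is on horizontal line it touches the left and right vertex stabilizers
--     else:
--         return [(r % L, c % L),
--                 ((r+1) % L, c % L)]  # qubit is on vertical, touch both up and bottom vertex stabilizers
--
-- def qubit_to_stab_vertex_indices(q, L):
--     stabs = qubit_to_stab_vertex(q,
--                                  L)  # stabs is a list with the stabilizers location that the qubit touch - 2 stabilizers
--     return [r * L + c for r, c in stabs]  # list with 2 stabilizers indices
--
-- def get_flipped_stabilizers_from_cluster_X(clusters, L):
--     stab_lists = []
--     for cluster in clusters: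
--         stab_count = defaultdict(int)  # dict for every cluster
--         for q in cluster:
--             for stab in qubit_to_stab_vertex_indices(q, L):  # the 2 stabilizers that this qubit touch(stabilizer index)
--                 stab_count[stab] += 1
--         # keep only stabilizers with odd parity (actually flipped)
--         stabs = sorted([s for s, count in stab_count.items() if count % 2 == 1])
--         stab_lists.append(
--             stabs)  # list with lists of the endpoints stabilizers for each cluster(the ones that didn't cancel)
--     return stab_lists
-- ===== SOURCE B (Python) =====
-- def qubit_idx_to_coord(q, L):
--     stripe = q // L
--     offset = q % L
--     is_horiz = (stripe % 2 == 0)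
--     row = stripe // 2
--     col = offset
--     return row, col, 'h' if is_horiz else 'v'
--
--
-- def qubit_to_stab_vertex(q, L):
--     r, c, ori = qubit_idx_to_coord(q, L)
--     if ori == 'h':
--         return [(r % L, c % L), (r % L, (c + 1) % L)]
--     else:
--         return [(r % L, c % L), ((r + 1) % L, c % L)]
--
--
-- def qubit_to_stab_vertex_indices(q, L):
--     return [r * L + c for r, c in qubit_to_stab_vertex(q, L)]
--
--
-- def get_flipped_stabilizers_from_cluster_X(clusters, L):
--     # Sort the multiset of touched stabilizer indices, then one scan over the
--     # equal-value runs keeps exactly the odd-length runs: no counting dict, no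
--     # filter pass, and the result comes out already sorted.
--     stab_lists = []
--     for cluster in clusters:
--         flat = sorted(s for q in cluster for s in qubit_to_stab_vertex_indices(q, L))
--         stabs = []
--         i = 0
--         n = len(flat)
--         while i < n:
--             j = i
--             while j < n and flat[j] == flat[i]:
--                 j += 1
--             if (j - i) % 2 == 1:
--                 stabs.append(flat[i])
--             i = j
--         stab_lists.append(stabs)
--     return stab_lists
-- ===== Notes on version B (the rewrite author's own statement) =====
-- stated objective: alternative
-- what changed: Replaces the per-cluster hash-count (defaultdict) plus odd-filter plus final sort with a sort-first run-length scan: the flat multiset of touched stabilizer indices is sorted once, then a single pass over equal-value runs keeps the runs of odd length, so no dictionary, no filter pass, and the output is produced already in order.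
import Mathlib
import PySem

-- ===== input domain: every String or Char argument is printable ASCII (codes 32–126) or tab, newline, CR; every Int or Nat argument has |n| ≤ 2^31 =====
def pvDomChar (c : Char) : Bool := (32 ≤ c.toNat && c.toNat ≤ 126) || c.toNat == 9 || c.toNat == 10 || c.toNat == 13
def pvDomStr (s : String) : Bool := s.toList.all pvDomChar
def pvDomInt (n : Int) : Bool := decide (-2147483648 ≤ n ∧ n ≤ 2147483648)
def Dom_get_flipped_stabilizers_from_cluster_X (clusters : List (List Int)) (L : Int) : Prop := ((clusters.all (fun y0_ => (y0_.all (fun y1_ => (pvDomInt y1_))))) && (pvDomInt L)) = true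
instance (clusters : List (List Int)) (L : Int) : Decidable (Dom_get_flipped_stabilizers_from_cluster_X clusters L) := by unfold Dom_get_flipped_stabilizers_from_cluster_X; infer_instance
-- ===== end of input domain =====

-- B replaces the per-cluster hash-count + odd-filter + sort with a sort-first run-length scan over the flat index multiset (alternative, similar cost).


-- ===== PORT A =====
def qubit_idx_to_coord (q L : Int) : Int × Int × String :=
  let stripe := PySem.Int.floordiv q L
  let offset := PySem.Int.mod q L
  let is_horiz := PySem.Int.mod stripe 2 == 0
  let row := PySem.Int.floordiv stripe 2
  let col := offset
  (row, col, if is_horiz then "h" else "v")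

def qubit_to_stab_vertex (q L : Int) : List (Int × Int) :=
  let rco := qubit_idx_to_coord q L
  let r := rco.1; let c := rco.2.1; let ori := rco.2.2
  if ori == "h" then
    [(PySem.Int.mod r L, PySem.Int.mod c L),
     (PySem.Int.mod r L, PySem.Int.mod (c + 1) L)]
  else
    [(PySem.Int.mod r L, PySem.Int.mod c L),
     (PySem.Int.mod (r + 1) L, PySem.Int.mod c L)]

def qubit_to_stab_vertex_indices (q L : Int) : List Int :=
  (qubit_to_stab_vertex q L).map (fun rc => rc.1 * L + rc.2)

def get_flipped_stabilizers_from_cluster_X (clusters : List (List Int)) (L : Int) : List (List Int) :=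
  clusters.foldl (fun stab_lists cluster =>
    let stab_count : PySem.Dict Int Int :=
      cluster.foldl (fun d q =>
        (qubit_to_stab_vertex_indices q L).foldl (fun d stab => d.modify stab 0 (· + 1)) d)
        PySem.Dict.empty
    let stabs := PySem.List.sorted
      ((stab_count.items.filter (fun sc => PySem.Int.mod sc.2 2 == 1)).map (fun sc => sc.1))
      (fun x => x) false
    stab_lists ++ [stabs]) []

-- ===== PORT B =====  (B shares the module helpers qubit_* above, as Source B does)
-- the outer while loop of Source B: scan the sorted list run by run, keeping odd-length runs
def pvRuns : List Int → List Int
  | [] => []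
  | x :: xs =>
    (if (1 + (xs.takeWhile (fun z => z == x)).length) % 2 == 1 then [x] else [])
      ++ pvRuns (xs.dropWhile (fun z => z == x))
termination_by l => l.length
decreasing_by exact Nat.lt_succ_of_le (List.length_dropWhile_le _ _)

def get_flipped_stabilizers_from_cluster_X_alt (clusters : List (List Int)) (L : Int) : List (List Int) :=
  clusters.foldl (fun stab_lists cluster =>
    let flat := PySem.List.sorted
      (cluster.flatMap (fun q => qubit_to_stab_vertex_indices q L)) (fun x => x) false
    stab_lists ++ [pvRuns flat]) []

-- ===== PRECONDITION & SPEC =====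
-- Pre_ excludes exactly the inputs where Python A raises ZeroDivisionError: L = 0 with some nonempty cluster.
def Pre_get_flipped_stabilizers_from_cluster_X (clusters : List (List Int)) (L : Int) : Prop :=
  L ≠ 0 ∨ ∀ c ∈ clusters, c = []
instance (clusters : List (List Int)) (L : Int) : Decidable (Pre_get_flipped_stabilizers_from_cluster_X clusters L) := by unfold Pre_get_flipped_stabilizers_from_cluster_X; infer_instance

def pvWitness_get_flipped_stabilizers_from_cluster_X : List (List Int) × Int := ([[0, 1, 2], [3]], 2)

def Spec_get_flipped_stabilizers_from_cluster_X (clusters : List (List Int)) (L : Int) (out : List (List Int)) : Prop := out = get_flipped_stabilizers_from_cluster_X_alt clusters L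
instance (clusters : List (List Int)) (L : Int) (out : List (List Int)) : Decidable (Spec_get_flipped_stabilizers_from_cluster_X clusters L out) := by unfold Spec_get_flipped_stabilizers_from_cluster_X; infer_instance

-- ===== CLAIM (what is proved, stated in full; the proofs are below) =====
def Claim_equal_get_flipped_stabilizers_from_cluster_X : Prop := ∀ (clusters : List (List Int)) (L : Int), Dom_get_flipped_stabilizers_from_cluster_X clusters L → Pre_get_flipped_stabilizers_from_cluster_X clusters L → Spec_get_flipped_stabilizers_from_cluster_X clusters L (get_flipped_stabilizers_from_cluster_X clusters L)

-- ===== LEMMAS AND PROOFS =====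

-- In a non-decreasing list headed by x, the copies of x are exactly the leading run.
theorem pv_not_mem_dropWhile (x : Int) (xs : List Int) (h : (x :: xs).Pairwise (· ≤ ·)) :
    x ∉ xs.dropWhile (fun z => z == x) := by
  induction xs with
  | nil => simp
  | cons a t ih =>
    by_cases hax : a = x
    · subst hax
      rw [List.dropWhile_cons_of_pos (by simp)]
      exact ih (by
        have h' := h
        simp only [List.pairwise_cons] at h' ⊢
        exact ⟨fun y hy => h'.1 y (List.mem_cons_of_mem _ hy), h'.2.2⟩)
    · rw [List.dropWhile_cons_of_neg (by simp [hax])]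
      intro hx
      rcases List.mem_cons.mp hx with h1 | h1
      · exact hax h1.symm
      · simp only [List.pairwise_cons] at h
        have hxa : x ≤ a := h.1 a (by simp)
        have hax' : a ≤ x := h.2.1 x h1
        exact hax (le_antisymm hax' hxa)

theorem pv_lt_of_mem_dropWhile (x : Int) (xs : List Int) (h : (x :: xs).Pairwise (· ≤ ·))
    (y : Int) (hy : y ∈ xs.dropWhile (fun z => z == x)) : x < y := by
  have hmem : y ∈ xs := (List.dropWhile_sublist _).subset hy
  have hle : x ≤ y := (List.pairwise_cons.mp h).1 y hmem
  rcases lt_or_eq_of_le hle with h1 | h1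
  · exact h1
  · exact absurd (h1 ▸ hy) (pv_not_mem_dropWhile x xs h)

-- counts across the takeWhile/dropWhile split of a sorted tail
theorem pv_count_head (x : Int) (xs : List Int) (h : (x :: xs).Pairwise (· ≤ ·)) :
    (x :: xs).count x = 1 + (xs.takeWhile (fun z => z == x)).length := by
  have hsplit : xs = xs.takeWhile (fun z => z == x) ++ xs.dropWhile (fun z => z == x) :=
    (List.takeWhile_append_dropWhile).symm
  have htake : (xs.takeWhile (fun z => z == x)).count x = (xs.takeWhile (fun z => z == x)).length := by
    apply List.count_eq_length.mpr
    intro y hy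
    have := List.mem_takeWhile_imp hy
    simp only [beq_iff_eq] at this
    exact this.symm
  have hdrop : (xs.dropWhile (fun z => z == x)).count x = 0 :=
    List.count_eq_zero.mpr (pv_not_mem_dropWhile x xs h)
  rw [List.count_cons_self]
  conv_lhs => rw [hsplit]
  rw [List.count_append, htake, hdrop]
  omega

theorem pv_count_ne (x : Int) (xs : List Int) (y : Int) (hyx : y ≠ x) :
    (x :: xs).count y = (xs.dropWhile (fun z => z == x)).count y := by
  have hsplit : xs = xs.takeWhile (fun z => z == x) ++ xs.dropWhile (fun z => z == x) :=
    (List.takeWhile_append_dropWhile).symm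
  have htake : (xs.takeWhile (fun z => z == x)).count y = 0 := by
    apply List.count_eq_zero.mpr
    intro hy
    have := List.mem_takeWhile_imp hy
    simp only [beq_iff_eq] at this
    exact hyx this
  have hc : (x :: xs).count y = xs.count y := by simp [Ne.symm hyx]
  rw [hc]
  conv_lhs => rw [hsplit]
  rw [List.count_append, htake]
  omega

-- the run-scan of a sorted list: strictly increasing, and membership = odd multiplicity
theorem pvRuns_spec (l : List Int) (h : l.Pairwise (· ≤ ·)) :
    (pvRuns l).Pairwise (· < ·) ∧ ∀ y, (y ∈ pvRuns l ↔ l.count y % 2 = 1) := by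
  induction l using pvRuns.induct with
  | case1 => simp [pvRuns]
  | case2 x xs ih =>
    have hdroppw : (xs.dropWhile (fun z => z == x)).Pairwise (· ≤ ·) :=
      List.Pairwise.sublist ((List.dropWhile_sublist _).cons _) h
    obtain ⟨ihpw, ihmem⟩ := ih hdroppw
    have hsub : ∀ y ∈ pvRuns (xs.dropWhile (fun z => z == x)), x < y := by
      intro y hy
      have hcnt := (ihmem y).mp hy
      have hpos : 0 < (xs.dropWhile (fun z => z == x)).count y := by omega
      exact pv_lt_of_mem_dropWhile x xs h y (List.count_pos_iff.mp hpos)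
    constructor
    · rw [pvRuns]
      split
      · exact List.pairwise_cons.mpr ⟨hsub, ihpw⟩
      · simpa using ihpw
    · intro y
      rw [pvRuns]
      by_cases hyx : y = x
      · subst hyx
        have hnot : y ∉ pvRuns (xs.dropWhile (fun z => z == y)) := fun hy =>
          absurd rfl (ne_of_lt (hsub y hy)).symm
        rw [pv_count_head y xs h]
        by_cases hodd : (1 + (xs.takeWhile (fun z => z == y)).length) % 2 = 1 <;>
          simp [hodd, hnot]
      · have hcne := pv_count_ne x xs y hyx
        rw [hcne]
        split
        · simp [ihmem y, hyx]
        · simp [ihmem y]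

-- Python-mod parity on a Nat cast.
theorem mod_cast_odd (n : Nat) : (PySem.Int.mod (n : Int) 2 == 1) = true ↔ n % 2 = 1 := by
  have h : PySem.Int.mod (n : Int) 2 = ((n % 2 : Nat) : Int) := by
    exact_mod_cast PySem.Int.mod_natCast n 2
  simp only [h, beq_iff_eq]
  omega

-- Characterisation of A's per-cluster value: the odd-count elements of the distinct list.
theorem a_cluster_eq (flat : List Int) :
    ((PySem.Dict.counter flat).items.filter (fun sc => PySem.Int.mod sc.2 2 == 1)).map
        (fun sc : Int × Int => sc.1)
      = (PySem.Set.ofList flat).filter (fun s => PySem.Int.mod ((flat.count s : Nat) : Int) 2 == 1) := by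
  rw [PySem.Dict.items_counter, List.filter_map, List.map_map]
  simp [Function.comp_def]

-- Per-cluster equality of the two strategies.
theorem cluster_eq (flat : List Int) :
    PySem.List.sorted
        (((PySem.Dict.counter flat).items.filter (fun sc => PySem.Int.mod sc.2 2 == 1)).map
          (fun sc : Int × Int => sc.1)) (fun x => x) false
      = pvRuns (PySem.List.sorted flat (fun x => x) false) := by
  rw [a_cluster_eq]
  have hpw : (PySem.List.sorted flat (fun x => x) false).Pairwise (· ≤ ·) :=
    PySem.List.sorted_pairwise flat (fun x => x)
  obtain ⟨hlt, hmem⟩ := pvRuns_spec _ hpw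
  have hcount : ∀ y, (PySem.List.sorted flat (fun x => x) false).count y = flat.count y :=
    fun y => (PySem.List.sorted_perm flat (fun x => x) false).count_eq y
  apply PySem.List.sorted_id_eq_of_perm_of_pairwise
  · rw [List.perm_ext_iff_of_nodup
      (hlt.imp (fun h => ne_of_lt h))
      (List.Nodup.filter _ (PySem.Set.nodup_ofList flat))]
    intro y
    rw [hmem y, hcount y, List.mem_filter]
    simp only [PySem.Set.mem_ofList, mod_cast_odd]
    constructor
    · intro h
      have hpos : 0 < flat.count y := by omega
      exact ⟨List.count_pos_iff.mp hpos, h⟩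
    · rintro ⟨-, h⟩
      exact h
  · exact hlt.imp (fun h => le_of_lt h)

-- ===== VERDICT (by name: the statement is the Claim_ definition above) =====
theorem get_flipped_stabilizers_from_cluster_X_spec : Claim_equal_get_flipped_stabilizers_from_cluster_X := by
  intro clusters L _ _
  unfold Spec_get_flipped_stabilizers_from_cluster_X
  unfold get_flipped_stabilizers_from_cluster_X get_flipped_stabilizers_from_cluster_X_alt
  rw [PySem.List.foldl_append_singleton_eq_map, PySem.List.foldl_append_singleton_eq_map]
  apply List.map_congr_left
  intro cluster _
  have hA : cluster.foldl (fun d q =>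
        (qubit_to_stab_vertex_indices q L).foldl (fun d stab => d.modify stab 0 (· + 1)) d)
        PySem.Dict.empty
      = PySem.Dict.counter (cluster.flatMap (fun q => qubit_to_stab_vertex_indices q L)) := by
    rw [PySem.Dict.counter_eq_foldl, List.foldl_flatMap]
  rw [hA, cluster_eq]
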